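-- pv_equiv track=rewrite | github.com/4fr0-d3v/OPDES | src/main.py | elegir_opcion_por_calidad
-- ===== SOURCE A (Python) =====
-- def ordenar_calidades(calidad: str) -> int:
--     orden = {
--         "480p": 480,
--         "720p": 720,
--         "1080p": 1080,
--     }
--     return orden.get(calidad.lower(), 0)
--
-- def elegir_opcion_por_calidad(opciones: list[dict], quality_config: str) -> dict | None:
--     if not opciones:
--         return None
--
--     opciones_validas = [x for x in opciones if x.get("quality") in {"480p", "720p", "1080p"}]
--     if not opciones_validas:
--         return opciones[0]
--
--     opciones_ordenadas = sorted(opciones_validas, key=lambda x: ordenar_calidades(x["quality"]))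
--
--     if quality_config == "max":
--         return opciones_ordenadas[-1]
--
--     for op in opciones_ordenadas:
--         if op["quality"] == quality_config:
--             return op
--
--     return opciones_ordenadas[-1]
-- ===== SOURCE B (Python) =====
-- def elegir_opcion_por_calidad(opciones, quality_config):
--     if not opciones:
--         return None
--
--     g480 = [x for x in opciones if x.get("quality") == "480p"]
--     g720 = [x for x in opciones if x.get("quality") == "720p"]
--     g1080 = [x for x in opciones if x.get("quality") == "1080p"]
--
--     if not (g480 or g720 or g1080):
--         return opciones[0]
--
--     if quality_config == "480p" and g480:
--         return g480[0]
--     if quality_config == "720p" and g720: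
--         return g720[0]
--     if quality_config == "1080p" and g1080:
--         return g1080[0]
--
--     for grupo in (g1080, g720, g480):
--         if grupo:
--             return grupo[-1]
-- ===== Notes on version B (the rewrite author's own statement) =====
-- stated objective: simpler
-- what changed: Replaces filter + stable sort + linear scan with a one-level bucket partition into the three quality groups and direct keyed selection (first of the requested group, last of the highest non-empty group), no sort and no helper key function.
import Mathlib
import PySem

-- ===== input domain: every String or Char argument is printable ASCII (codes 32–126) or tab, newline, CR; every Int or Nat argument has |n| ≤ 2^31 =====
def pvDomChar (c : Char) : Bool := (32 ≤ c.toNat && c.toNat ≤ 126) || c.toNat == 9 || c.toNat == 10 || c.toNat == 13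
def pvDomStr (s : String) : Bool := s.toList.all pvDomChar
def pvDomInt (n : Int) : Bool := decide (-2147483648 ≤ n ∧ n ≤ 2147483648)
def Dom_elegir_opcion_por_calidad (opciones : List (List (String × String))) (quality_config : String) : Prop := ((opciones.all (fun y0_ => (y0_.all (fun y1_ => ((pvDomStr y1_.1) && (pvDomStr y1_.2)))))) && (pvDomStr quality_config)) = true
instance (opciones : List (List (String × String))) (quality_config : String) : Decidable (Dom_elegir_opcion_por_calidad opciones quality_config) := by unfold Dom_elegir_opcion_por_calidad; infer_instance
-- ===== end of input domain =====

-- ===== PORT A =====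
-- B replaces A's filter + stable sort + scan by a three-bucket partition with direct keyed selection (objective: simpler).
def ordenar_calidades (calidad : String) : Int :=
  PySem.Dict.getD (PySem.Dict.ofList [("480p", (480 : Int)), ("720p", 720), ("1080p", 1080)])
    (PySem.Str.lower calidad) 0

def elegir_opcion_por_calidad (opciones : List (List (String × String))) (quality_config : String) :
    Option (List (String × String)) :=
  if opciones.isEmpty then
    none
  else
    -- x.get("quality") in {"480p","720p","1080p"}  (dict.get = first match in the association list)
    let opciones_validas := opciones.filter (fun x =>
      x.lookup "quality" == some "480p" || (x.lookup "quality" == some "720p" ||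
        x.lookup "quality" == some "1080p"))
    if opciones_validas.isEmpty then
      PySem.List.pyGet? opciones 0
    else
      -- x["quality"]: the key is present on every element of opciones_validas, so the getD "" default is never used
      let opciones_ordenadas := PySem.List.sorted opciones_validas
        (fun x => ordenar_calidades ((x.lookup "quality").getD ""))
      if quality_config == "max" then
        PySem.List.pyGet? opciones_ordenadas (-1)
      else
        -- the for-loop with early return is List.find?
        match opciones_ordenadas.find? (fun op => (op.lookup "quality").getD "" == quality_config) with
        | some op => some op
        | none => PySem.List.pyGet? opciones_ordenadas (-1)

-- ===== PORT B =====
def elegir_opcion_por_calidad_alt (opciones : List (List (String × String))) (quality_config : String) :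
    Option (List (String × String)) :=
  if opciones.isEmpty then
    none
  else
    let g480 := opciones.filter (fun x => x.lookup "quality" == some "480p")
    let g720 := opciones.filter (fun x => x.lookup "quality" == some "720p")
    let g1080 := opciones.filter (fun x => x.lookup "quality" == some "1080p")
    if g480.isEmpty && (g720.isEmpty && g1080.isEmpty) then
      PySem.List.pyGet? opciones 0
    else if quality_config == "480p" && !g480.isEmpty then
      g480.head?
    else if quality_config == "720p" && !g720.isEmpty then
      g720.head?
    else if quality_config == "1080p" && !g1080.isEmpty then
      g1080.head?
    else if !g1080.isEmpty then
      g1080.getLast?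
    else if !g720.isEmpty then
      g720.getLast?
    else
      g480.getLast?

-- ===== PRECONDITION & SPEC =====
def Spec_elegir_opcion_por_calidad (opciones : List (List (String × String))) (quality_config : String) (out : Option (List (String × String))) : Prop := out = elegir_opcion_por_calidad_alt opciones quality_config
instance (opciones : List (List (String × String))) (quality_config : String) (out : Option (List (String × String))) : Decidable (Spec_elegir_opcion_por_calidad opciones quality_config out) := by unfold Spec_elegir_opcion_por_calidad; infer_instance

-- ===== CLAIM (what is proved, stated in full; the proofs are below) =====
def Claim_equal_elegir_opcion_por_calidad : Prop := ∀ (opciones : List (List (String × String))) (quality_config : String), Dom_elegir_opcion_por_calidad opciones quality_config → Spec_elegir_opcion_por_calidad opciones quality_config (elegir_opcion_por_calidad opciones quality_config)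

-- ===== LEMMAS AND PROOFS =====

def pvQ (q : String) (x : List (String × String)) : Bool := x.lookup "quality" == some q
def pvValid (x : List (String × String)) : Bool :=
  pvQ "480p" x || (pvQ "720p" x || pvQ "1080p" x)
def pvKey (x : List (String × String)) : Int := ordenar_calidades ((x.lookup "quality").getD "")
def pvBef (x y : List (String × String)) : Bool := decide (pvKey x < pvKey y)

theorem pyGet_neg_one {α : Type} (xs : List α) (h : xs ≠ []) :
    PySem.List.pyGet? xs (-1) = xs.getLast? := by
  have hl : 0 < xs.length := List.length_pos_iff.mpr h
  simp only [PySem.List.pyGet?, PySem.List.pyIdx?]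
  rw [List.getLast?_eq_getElem?]
  split_ifs with h1 h2 h3
  · omega
  · omega
  · norm_num
  · exfalso
    push_cast at h3
    omega

theorem find?_all_true {α : Type} {p : α → Bool} {l : List α} (h : ∀ x ∈ l, p x = true) :
    l.find? p = l.head? := by
  cases l with
  | nil => rfl
  | cons a l => simp [h a (by simp)]

theorem insertBy_cons {α : Type} (before : α → α → Bool) (x y : α) (ys : List α) :
    PySem.List.insertBy before x (y :: ys) =
      if before x y then x :: y :: ys else y :: PySem.List.insertBy before x ys := rfl

theorem insertBy_append_not {α : Type} (before : α → α → Bool) (x : α) (u v : List α)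
    (hu : ∀ y ∈ u, before x y = false) :
    PySem.List.insertBy before x (u ++ v) = u ++ PySem.List.insertBy before x v := by
  induction u with
  | nil => simp
  | cons a u ih =>
    have ha := hu a (by simp)
    simp only [List.cons_append, insertBy_cons, ha, Bool.false_eq_true, if_false]
    rw [ih (fun y hy => hu y (by simp [hy]))]

theorem insertBy_all_before {α : Type} (before : α → α → Bool) (x : α) (v : List α)
    (hv : ∀ y ∈ v, before x y = true) :
    PySem.List.insertBy before x v = x :: v := by
  cases v with
  | nil => rfl
  | cons a v => simp [insertBy_cons, hv a (by simp)]

theorem pvQ_lookup {q : String} {x : List (String × String)} (h : pvQ q x = true) :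
    x.lookup "quality" = some q := by simpa [pvQ] using h

theorem pvKey480 {x : List (String × String)} (h : pvQ "480p" x = true) : pvKey x = 480 := by
  simp only [pvKey, pvQ_lookup h, Option.getD_some]; decide
theorem pvKey720 {x : List (String × String)} (h : pvQ "720p" x = true) : pvKey x = 720 := by
  simp only [pvKey, pvQ_lookup h, Option.getD_some]; decide
theorem pvKey1080 {x : List (String × String)} (h : pvQ "1080p" x = true) : pvKey x = 1080 := by
  simp only [pvKey, pvQ_lookup h, Option.getD_some]; decide

theorem fold_partition : ∀ (l a b c : List (List (String × String))),
    (∀ x ∈ a, pvQ "480p" x = true) → (∀ x ∈ b, pvQ "720p" x = true) →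
    (∀ x ∈ c, pvQ "1080p" x = true) →
    (l.filter pvValid).foldl (fun acc x => PySem.List.insertBy pvBef x acc) (a ++ b ++ c)
      = (a ++ l.filter (pvQ "480p")) ++
          ((b ++ l.filter (pvQ "720p")) ++ (c ++ l.filter (pvQ "1080p"))) := by
  intro l
  induction l with
  | nil => intro a b c _ _ _; simp
  | cons x l ih =>
    intro a b c ha hb hc
    by_cases h4 : pvQ "480p" x = true
    · have hv : pvValid x = true := by simp [pvValid, h4]
      have hl4 := pvQ_lookup h4
      have h7 : pvQ "720p" x = false := by simp [pvQ, hl4]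
      have h10 : pvQ "1080p" x = false := by simp [pvQ, hl4]
      have hstep : PySem.List.insertBy pvBef x (a ++ b ++ c) = (a ++ [x]) ++ b ++ c := by
        rw [List.append_assoc, insertBy_append_not pvBef x a (b ++ c)
              (fun y hy => by simp [pvBef, pvKey480 h4, pvKey480 (ha y hy)]),
            insertBy_all_before pvBef x (b ++ c)
              (fun y hy => by
                rcases List.mem_append.mp hy with hy | hy
                · simp [pvBef, pvKey480 h4, pvKey720 (hb y hy)]
                · simp [pvBef, pvKey480 h4, pvKey1080 (hc y hy)])]
        simp
      simp only [List.filter_cons, hv, h4, h7, h10, if_true, Bool.false_eq_true, if_false,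
        List.foldl_cons, hstep]
      rw [ih (a ++ [x]) b c (List.forall_mem_append.mpr ⟨ha, by simpa using h4⟩) hb hc]
      simp
    · by_cases h7 : pvQ "720p" x = true
      · have hv : pvValid x = true := by simp [pvValid, h7]
        have hl7 := pvQ_lookup h7
        have h10 : pvQ "1080p" x = false := by simp [pvQ, hl7]
        have h4' : pvQ "480p" x = false := by simp [pvQ, hl7]
        have hstep : PySem.List.insertBy pvBef x (a ++ b ++ c) = a ++ (b ++ [x]) ++ c := by
          rw [insertBy_append_not pvBef x (a ++ b) c
                (fun y hy => by
                  rcases List.mem_append.mp hy with hy | hy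
                  · simp [pvBef, pvKey720 h7, pvKey480 (ha y hy)]
                  · simp [pvBef, pvKey720 h7, pvKey720 (hb y hy)]),
              insertBy_all_before pvBef x c
                (fun y hy => by simp [pvBef, pvKey720 h7, pvKey1080 (hc y hy)])]
          simp
        simp only [List.filter_cons, hv, h7, h4', h10, if_true, Bool.false_eq_true, if_false,
          List.foldl_cons, hstep]
        rw [ih a (b ++ [x]) c ha (List.forall_mem_append.mpr ⟨hb, by simpa using h7⟩) hc]
        simp
      · by_cases h10 : pvQ "1080p" x = true
        · have hv : pvValid x = true := by simp [pvValid, h10]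
          have hl10 := pvQ_lookup h10
          have h4' : pvQ "480p" x = false := by simp [pvQ, hl10]
          have h7' : pvQ "720p" x = false := by simp [pvQ, hl10]
          have hstep : PySem.List.insertBy pvBef x (a ++ b ++ c) = a ++ b ++ (c ++ [x]) := by
            rw [PySem.List.insertBy_of_forall_not_before pvBef x (a ++ b ++ c)
                  (fun y hy => by
                    rcases List.mem_append.mp hy with hy | hy
                    · rcases List.mem_append.mp hy with hy | hy
                      · simp [pvBef, pvKey1080 h10, pvKey480 (ha y hy)]
                      · simp [pvBef, pvKey1080 h10, pvKey720 (hb y hy)]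
                    · simp [pvBef, pvKey1080 h10, pvKey1080 (hc y hy)])]
            simp
          simp only [List.filter_cons, hv, h4', h7', h10, if_true, Bool.false_eq_true, if_false,
            List.foldl_cons, hstep]
          rw [ih a b (c ++ [x]) ha hb (List.forall_mem_append.mpr ⟨hc, by simpa using h10⟩)]
          simp
        · have hv : pvValid x = false := by
            simp only [pvValid]; simp [h4, h7, h10]
          simp only [List.filter_cons, hv, Bool.false_eq_true, if_false,
            eq_false_of_ne_true h4, eq_false_of_ne_true h7, eq_false_of_ne_true h10]
          exact ih a b c ha hb hc

-- the stable sort of the valid options is exactly the three quality buckets in order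
theorem sorted_validas (opciones : List (List (String × String))) :
    PySem.List.sorted (opciones.filter pvValid) pvKey
      = opciones.filter (pvQ "480p") ++
          (opciones.filter (pvQ "720p") ++ opciones.filter (pvQ "1080p")) := by
  rw [PySem.List.sorted_eq_foldl_insertBy]
  have := fold_partition opciones [] [] [] (by simp) (by simp) (by simp)
  simpa [pvBef] using this

theorem validas_empty_iff (opciones : List (List (String × String))) :
    opciones.filter pvValid = [] ↔
      (opciones.filter (pvQ "480p") = [] ∧ opciones.filter (pvQ "720p") = [] ∧
        opciones.filter (pvQ "1080p") = []) := by
  simp only [List.filter_eq_nil_iff]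
  constructor
  · intro h
    refine ⟨fun x hx => ?_, fun x hx => ?_, fun x hx => ?_⟩ <;>
      · have := h x hx
        simp only [pvValid, Bool.or_eq_true, not_or] at this
        tauto
  · rintro ⟨h1, h2, h3⟩ x hx
    simp only [pvValid, Bool.or_eq_true, not_or]
    exact ⟨h1 x hx, h2 x hx, h3 x hx⟩

theorem last_chain {α : Type} (a b c : List α) (h : ¬(a = [] ∧ b = [] ∧ c = [])) :
    (a ++ (b ++ c)).getLast? =
      if !c.isEmpty then c.getLast?
      else if !b.isEmpty then b.getLast? else a.getLast? := by
  rw [List.getLast?_append, List.getLast?_append]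
  by_cases hc : c = []
  · by_cases hbb : b = []
    · have ha : a ≠ [] := by tauto
      simp [hc, hbb]
    · obtain ⟨z, hz⟩ := List.exists_mem_of_ne_nil b hbb
      have : b.getLast? ≠ none := by simp [List.getLast?_eq_none_iff, hbb]
      obtain ⟨w, hw⟩ := Option.ne_none_iff_exists'.mp this
      simp [hc, hbb, hw]
  · have : c.getLast? ≠ none := by simp [List.getLast?_eq_none_iff, hc]
    obtain ⟨w, hw⟩ := Option.ne_none_iff_exists'.mp this
    simp [hc, hw]

theorem find?_filterQ (opciones : List (List (String × String))) (q qc : String) :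
    (opciones.filter (pvQ q)).find? (fun op => (op.lookup "quality").getD "" == qc)
      = if q = qc then (opciones.filter (pvQ q)).head? else none := by
  have hmem : ∀ x ∈ opciones.filter (pvQ q), x.lookup "quality" = some q := by
    intro x hx
    exact pvQ_lookup (List.of_mem_filter hx)
  by_cases hq : q = qc
  · rw [if_pos hq]
    exact find?_all_true (fun x hx => by simp [hmem x hx, hq])
  · rw [if_neg hq]
    exact List.find?_eq_none.mpr (fun x hx => by simp [hmem x hx]; exact fun h => hq h)

-- ===== VERDICT (by name: the statement is the Claim_ definition above) =====
theorem elegir_opcion_por_calidad_spec : Claim_equal_elegir_opcion_por_calidad := by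
  intro opciones quality_config _
  unfold Spec_elegir_opcion_por_calidad
  simp only [elegir_opcion_por_calidad, elegir_opcion_por_calidad_alt]
  rw [show (fun x : List (String × String) =>
        x.lookup "quality" == some "480p" || (x.lookup "quality" == some "720p" ||
          x.lookup "quality" == some "1080p")) = pvValid from rfl,
      show (fun x : List (String × String) =>
        ordenar_calidades ((x.lookup "quality").getD "")) = pvKey from rfl,
      show (fun x : List (String × String) => x.lookup "quality" == some "480p") = pvQ "480p" from rfl,
      show (fun x : List (String × String) => x.lookup "quality" == some "720p") = pvQ "720p" from rfl,
      show (fun x : List (String × String) => x.lookup "quality" == some "1080p") = pvQ "1080p" from rfl]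
  by_cases hne : opciones.isEmpty
  · simp [hne]
  · simp only [hne, Bool.false_eq_true, if_false]
    by_cases hval : (opciones.filter pvValid).isEmpty
    · have h3 := (validas_empty_iff opciones).mp (List.isEmpty_iff.mp hval)
      simp [hval, List.isEmpty_iff.mpr h3.1, List.isEmpty_iff.mpr h3.2.1,
        List.isEmpty_iff.mpr h3.2.2]
    · have hvne : opciones.filter pvValid ≠ [] := fun h => hval (List.isEmpty_iff.mpr h)
      have htriple : ¬(opciones.filter (pvQ "480p") = [] ∧ opciones.filter (pvQ "720p") = [] ∧
          opciones.filter (pvQ "1080p") = []) :=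
        fun h => hvne ((validas_empty_iff opciones).mpr h)
      have hie : ∀ q : String, opciones.filter (pvQ q) ≠ [] →
          (opciones.filter (pvQ q)).isEmpty = false := by
        intro q hq
        cases hfe : (opciones.filter (pvQ q)).isEmpty
        · rfl
        · exact absurd (List.isEmpty_iff.mp hfe) hq
      have hguard : ((opciones.filter (pvQ "480p")).isEmpty &&
          ((opciones.filter (pvQ "720p")).isEmpty && (opciones.filter (pvQ "1080p")).isEmpty)) = false := by
        by_cases e4 : opciones.filter (pvQ "480p") = []
        · by_cases e7 : opciones.filter (pvQ "720p") = []
          · by_cases e10 : opciones.filter (pvQ "1080p") = []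
            · exact absurd ⟨e4, e7, e10⟩ htriple
            · simp [hie _ e10]
          · simp [hie _ e7]
        · simp [hie _ e4]
      have hSne : opciones.filter (pvQ "480p") ++
          (opciones.filter (pvQ "720p") ++ opciones.filter (pvQ "1080p")) ≠ [] := by
        rw [← sorted_validas opciones]
        simpa [PySem.List.sorted_eq_nil_iff] using hvne
      simp only [hval, Bool.false_eq_true, if_false, hguard, sorted_validas opciones]
      rw [pyGet_neg_one _ hSne, last_chain _ _ _ htriple]
      by_cases hmax : quality_config = "max"
      · subst hmax
        simp only [show (("max" : String) == "max") = true from by decide, if_true,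
          show (("max" : String) == "480p") = false from by decide,
          show (("max" : String) == "720p") = false from by decide,
          show (("max" : String) == "1080p") = false from by decide,
          Bool.false_and, Bool.false_eq_true, if_false]
      · have hmaxb : (quality_config == "max") = false := by simpa using hmax
        simp only [hmaxb, Bool.false_eq_true, if_false]
        rw [List.find?_append, List.find?_append, find?_filterQ, find?_filterQ, find?_filterQ]
        by_cases h4 : quality_config = "480p"
        · subst h4
          simp only [if_neg (by decide : ¬("720p" : String) = "480p"),
            if_neg (by decide : ¬("1080p" : String) = "480p"), Option.or_none,
            show (("480p" : String) == "480p") = true from by decide,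
            show (("480p" : String) == "720p") = false from by decide,
            show (("480p" : String) == "1080p") = false from by decide,
            Bool.true_and, Bool.false_and, Bool.false_eq_true, if_false]
          by_cases he : opciones.filter (pvQ "480p") = []
          · rw [he]
            rfl
          · obtain ⟨w, ws, hw⟩ := List.exists_cons_of_ne_nil he
            rw [hw]
            simp only [List.head?_cons, List.isEmpty_cons, Bool.not_false]
            rfl
        · have h4b : (quality_config == "480p") = false := by simpa using h4
          by_cases h7 : quality_config = "720p"
          · subst h7
            simp only [if_neg (by decide : ¬("480p" : String) = "720p"),
              if_neg (by decide : ¬("1080p" : String) = "720p"), Option.none_or, Option.or_none,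
              show (("720p" : String) == "720p") = true from by decide,
              show (("720p" : String) == "480p") = false from by decide,
              show (("720p" : String) == "1080p") = false from by decide,
              Bool.true_and, Bool.false_and, Bool.false_eq_true, if_false]
            by_cases he : opciones.filter (pvQ "720p") = []
            · rw [he]
              rfl
            · obtain ⟨w, ws, hw⟩ := List.exists_cons_of_ne_nil he
              rw [hw]
              simp only [List.head?_cons, List.isEmpty_cons, Bool.not_false]
              rfl
          · have h7b : (quality_config == "720p") = false := by simpa using h7
            by_cases h10 : quality_config = "1080p"
            · subst h10
              simp only [if_neg (by decide : ¬("480p" : String) = "1080p"),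
                if_neg (by decide : ¬("720p" : String) = "1080p"), Option.none_or,
                show (("1080p" : String) == "1080p") = true from by decide,
                show (("1080p" : String) == "480p") = false from by decide,
                show (("1080p" : String) == "720p") = false from by decide,
                Bool.true_and, Bool.false_and, Bool.false_eq_true, if_false]
              by_cases he : opciones.filter (pvQ "1080p") = []
              · rw [he]
                rfl
              · obtain ⟨w, ws, hw⟩ := List.exists_cons_of_ne_nil he
                rw [hw]
                simp only [List.head?_cons, List.isEmpty_cons, Bool.not_false]
                rfl
            · have h10b : (quality_config == "1080p") = false := by simpa using h10
              simp only [if_neg (Ne.symm h4), if_neg (Ne.symm h7), if_neg (Ne.symm h10),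
                h4b, h7b, h10b, Bool.false_and, Bool.false_eq_true, if_false, Option.none_or]
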